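-- pv_equiv track=rewrite | github.com/SantiagoFolatti/Ejercicios_Programacion1 | Ejercicios Unidimensionales/Unidimensionales/EJ7.py | posiciones_valor_maximo
-- ===== SOURCE A (Python) =====
-- def posiciones_valor_maximo(numeros):
--     maximo = numeros[0]
--     posiciones = []
--
--     for i in range(1, len(numeros)):
--         if numeros[i] > maximo:
--             maximo = numeros[i]
--
--     for i in range(len(numeros)):
--         if numeros[i] == maximo:
--             posiciones = posiciones + [i]
--     return posiciones
-- ===== SOURCE B (Python) =====
-- def posiciones_valor_maximo(numeros):
--     maximo = numeros[0]
--     posiciones = []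
--     for i in range(len(numeros)):
--         if numeros[i] > maximo:
--             maximo = numeros[i]
--             posiciones = [i]
--         elif numeros[i] == maximo:
--             posiciones.append(i)
--     return posiciones
-- ===== Notes on version B (the rewrite author's own statement) =====
-- stated objective: faster
-- what changed: Replaces A's two scans (one to find the max, one building positions by quadratic list concatenation) with a single pass that maintains the running max and the position list, resetting it when a new max appears.
import Mathlib
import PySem

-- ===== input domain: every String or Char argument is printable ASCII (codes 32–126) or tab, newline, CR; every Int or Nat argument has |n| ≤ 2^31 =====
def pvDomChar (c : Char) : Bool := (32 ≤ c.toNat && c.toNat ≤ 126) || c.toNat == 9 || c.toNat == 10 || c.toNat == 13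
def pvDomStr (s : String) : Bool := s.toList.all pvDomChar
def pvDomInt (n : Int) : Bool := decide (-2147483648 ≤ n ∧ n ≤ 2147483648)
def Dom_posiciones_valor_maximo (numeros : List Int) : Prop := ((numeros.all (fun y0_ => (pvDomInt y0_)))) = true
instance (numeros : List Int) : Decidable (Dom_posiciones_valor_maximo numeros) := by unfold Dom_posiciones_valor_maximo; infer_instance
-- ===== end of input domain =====

-- ===== PORT A =====
-- B merges A's two scans into one pass with a running max and a resetting position list.
-- Both programs raise IndexError on the empty list; Pre_ excludes it.
def posiciones_valor_maximo (numeros : List Int) : List Int :=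
  let maximo : Int := PySem.List.pyGetD numeros 0 0
  let maximo : Int :=
    (PySem.List.pyRange 1 (numeros.length : Int) 1).foldl
      (fun m i =>
        if PySem.List.pyGetD numeros i 0 > m then PySem.List.pyGetD numeros i 0 else m)
      maximo
  (PySem.List.pyRange 0 (numeros.length : Int) 1).foldl
    (fun acc i =>
      if PySem.List.pyGetD numeros i 0 = maximo then acc ++ [i] else acc)
    []

-- ===== PORT B =====
def posiciones_valor_maximo_alt (numeros : List Int) : List Int :=
  let st : Int × List Int := (PySem.List.pyGetD numeros 0 0, [])
  ((PySem.List.pyRange 0 (numeros.length : Int) 1).foldl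
    (fun (st : Int × List Int) i =>
      if PySem.List.pyGetD numeros i 0 > st.1 then (PySem.List.pyGetD numeros i 0, [i])
      else if PySem.List.pyGetD numeros i 0 = st.1 then (st.1, st.2 ++ [i])
      else st)
    st).2

-- ===== PRECONDITION & SPEC =====
-- Pre_ excludes the empty list, on which both A and B raise IndexError reading the first element.
def Pre_posiciones_valor_maximo (numeros : List Int) : Prop := numeros ≠ []
instance (numeros : List Int) : Decidable (Pre_posiciones_valor_maximo numeros) := by
  unfold Pre_posiciones_valor_maximo; infer_instance
def pvWitness_posiciones_valor_maximo : List Int := [3, 1, 3]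

def Spec_posiciones_valor_maximo (numeros : List Int) (out : List Int) : Prop := out = posiciones_valor_maximo_alt numeros
instance (numeros : List Int) (out : List Int) : Decidable (Spec_posiciones_valor_maximo numeros out) := by unfold Spec_posiciones_valor_maximo; infer_instance

-- ===== CLAIM (what is proved, stated in full; the proofs are below) =====
def Claim_equal_posiciones_valor_maximo : Prop := ∀ (numeros : List Int), Dom_posiciones_valor_maximo numeros → Pre_posiciones_valor_maximo numeros → Spec_posiciones_valor_maximo numeros (posiciones_valor_maximo numeros)

-- ===== LEMMAS AND PROOFS =====

-- running max of A's first loop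
def pvFmax (m : Int) (l : List Int) : Int :=
  l.foldl (fun a b => if b > a then b else a) m

-- positions (starting at index s) of the value M in l
def pvPos (M : Int) (l : List Int) (s : Int) : List Int :=
  ((PySem.List.enumerate l s).filter (fun p => p.2 = M)).map (fun p => p.1)

theorem pvFmax_nil (m : Int) : pvFmax m [] = m := rfl

theorem pvFmax_cons (m x : Int) (l : List Int) :
    pvFmax m (x :: l) = pvFmax (if x > m then x else m) l := rfl

theorem pvFmax_ge (m : Int) (l : List Int) : m ≤ pvFmax m l := by
  induction l generalizing m with
  | nil => simp [pvFmax]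
  | cons x l ih =>
    rw [pvFmax_cons]
    split_ifs with h
    · exact le_trans (le_of_lt h) (ih x)
    · exact ih m

theorem pvPos_nil (M s : Int) : pvPos M [] s = [] := by
  simp [pvPos, PySem.List.enumerate_nil]

theorem pvPos_cons (M x s : Int) (l : List Int) :
    pvPos M (x :: l) s = (if x = M then [s] else []) ++ pvPos M l (s + 1) := by
  simp [pvPos, PySem.List.enumerate_cons]
  split_ifs with h <;> simp [h]

-- B's loop invariant
theorem pvB_fold (l : List Int) (s m : Int) (p : List Int) :
    (PySem.List.enumerate l s).foldl
      (fun (st : Int × List Int) q =>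
        if q.2 > st.1 then (q.2, [q.1])
        else if q.2 = st.1 then (st.1, st.2 ++ [q.1])
        else st)
      (m, p)
    = (pvFmax m l, (if pvFmax m l = m then p else []) ++ pvPos (pvFmax m l) l s) := by
  induction l generalizing s m p with
  | nil => simp [pvFmax_nil, pvPos_nil]
  | cons x l ih =>
    rw [PySem.List.enumerate_cons, List.foldl_cons, pvFmax_cons, pvPos_cons]
    by_cases h1 : x > m
    · simp only [h1, if_pos]
      rw [ih]
      have hM : m < pvFmax x l := lt_of_lt_of_le h1 (pvFmax_ge x l)
      have hMx : ¬ pvFmax x l = m := by omega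
      simp only [hMx]
      by_cases h2 : pvFmax x l = x
      · rw [if_pos h2, if_pos h2.symm]
        simp
      · rw [if_neg h2, if_neg (fun hc : x = pvFmax x l => h2 hc.symm)]
        simp
    · simp only [h1, if_false]
      by_cases h2 : x = m
      · simp only [h2, if_pos]
        rw [ih]
        by_cases h3 : pvFmax m l = m
        · simp [h3]
        · have hx : ¬ x = pvFmax m l := by rw [h2]; intro hc; exact h3 hc.symm
          have h3' : ¬ m = pvFmax m l := fun hc => h3 hc.symm
          simp [h3, h3']
      · simp only [h2, if_false]
        rw [ih]
        have hx : ¬ x = pvFmax m l := by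
          have := pvFmax_ge m l
          intro hc; omega
        simp [hx]

-- A's positions loop builds exactly pvPos
theorem pvA_fold (l : List Int) (M s : Int) (acc : List Int) :
    (PySem.List.enumerate l s).foldl
      (fun (acc : List Int) q => if q.2 = M then acc ++ [q.1] else acc) acc
    = acc ++ pvPos M l s := by
  induction l generalizing s acc with
  | nil => simp [pvPos_nil, PySem.List.enumerate_nil]
  | cons x l ih =>
    rw [PySem.List.enumerate_cons, List.foldl_cons, pvPos_cons]
    split_ifs with h
    · rw [ih]; simp
    · rw [ih]; simp

-- A's pyRange fold computes pvPos
theorem pvA_range (xs : List Int) (M : Int) :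
    (PySem.List.pyRange 0 (xs.length : Int) 1).foldl
      (fun acc i => if PySem.List.pyGetD xs i 0 = M then acc ++ [i] else acc) []
    = pvPos M xs 0 := by
  have h := pvA_fold xs M 0 []
  rw [PySem.List.enumerate_eq_map_pyRange (d := 0), List.foldl_map] at h
  simpa using h

-- B's pyRange fold computes (running max, pvPos of it)
theorem pvB_range (xs : List Int) (m : Int) :
    ((PySem.List.pyRange 0 (xs.length : Int) 1).foldl
      (fun (st : Int × List Int) i =>
        if PySem.List.pyGetD xs i 0 > st.1 then (PySem.List.pyGetD xs i 0, [i])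
        else if PySem.List.pyGetD xs i 0 = st.1 then (st.1, st.2 ++ [i]) else st)
      (m, []))
    = (pvFmax m xs, pvPos (pvFmax m xs) xs 0) := by
  have h := pvB_fold xs 0 m []
  rw [PySem.List.enumerate_eq_map_pyRange (d := 0), List.foldl_map] at h
  simpa using h

-- ===== VERDICT (by name: the statement is the Claim_ definition above) =====
theorem posiciones_valor_maximo_spec : Claim_equal_posiciones_valor_maximo := by
  intro numeros _ hpre
  unfold Spec_posiciones_valor_maximo
  obtain ⟨h, t, rfl⟩ : ∃ h t, numeros = h :: t := by
    cases numeros with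
    | nil => exact absurd rfl hpre
    | cons h t => exact ⟨h, t, rfl⟩
  unfold posiciones_valor_maximo posiciones_valor_maximo_alt
  simp only []
  rw [pvA_range, pvB_range]
  have hA : (PySem.List.pyRange 1 (((h :: t).length : Int)) 1).foldl
      (fun m i => if PySem.List.pyGetD (h :: t) i 0 > m then PySem.List.pyGetD (h :: t) i 0 else m)
      (PySem.List.pyGetD (h :: t) 0 0)
      = pvFmax (PySem.List.pyGetD (h :: t) 0 0) (h :: t) := by
    have hd := PySem.List.foldl_pyRange_pyGetD' (xs := h :: t) (d := 0)
      (f := fun m x => if x > m then x else m)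
      (init := PySem.List.pyGetD (h :: t) 0 0) (a := 1) (by norm_num)
    rw [PySem.List.pyGetD_zero_cons] at hd ⊢
    rw [hd]
    simp [pvFmax]
  rw [hA]
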